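-- pv_equiv track=rewrite | github.com/jam928/python-algo | amazon_oa/maximum_total_discrepancy.py | dfs
-- ===== SOURCE A (Python) =====
-- def dfs(visited, node, distance, graph, weight):
--     if node in visited:
--         return 0
--
--     visited.add(node)
--     max_disc = distance * weight[node - 1]
--
--     for neighbor, val in graph[node]:
--         max_disc += dfs(visited, neighbor, distance + 1, graph, weight)
--
--     visited.remove(node)
--
--     return max_disc
-- ===== SOURCE B (Python) =====
-- def dfs(visited, node, distance, graph, weight):
--     # Level-synchronous (breadth-first) expansion of the path tree: each frontier
--     # entry carries its own immutable visited set, so no shared-set backtracking.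
--     # Unlike A, this does not (transiently) mutate `visited`; A restores it anyway.
--     total = 0
--     frontier = [(frozenset(visited), node, distance)]
--     while frontier:
--         nxt = []
--         for seen, n, d in frontier:
--             if n in seen:
--                 continue
--             total += d * weight[n - 1]
--             seen = seen | {n}
--             for child, _val in graph[n]:
--                 nxt.append((seen, child, d + 1))
--         frontier = nxt
--     return total
-- ===== Notes on version B (the rewrite author's own statement) =====
-- stated objective: alternative
-- what changed: Replaced A's recursive depth-first traversal with a shared backtracking visited set by an iterative level-synchronous (breadth-first) expansion of the path tree in which each frontier entry carries its own immutable visited set.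
import Mathlib
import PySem

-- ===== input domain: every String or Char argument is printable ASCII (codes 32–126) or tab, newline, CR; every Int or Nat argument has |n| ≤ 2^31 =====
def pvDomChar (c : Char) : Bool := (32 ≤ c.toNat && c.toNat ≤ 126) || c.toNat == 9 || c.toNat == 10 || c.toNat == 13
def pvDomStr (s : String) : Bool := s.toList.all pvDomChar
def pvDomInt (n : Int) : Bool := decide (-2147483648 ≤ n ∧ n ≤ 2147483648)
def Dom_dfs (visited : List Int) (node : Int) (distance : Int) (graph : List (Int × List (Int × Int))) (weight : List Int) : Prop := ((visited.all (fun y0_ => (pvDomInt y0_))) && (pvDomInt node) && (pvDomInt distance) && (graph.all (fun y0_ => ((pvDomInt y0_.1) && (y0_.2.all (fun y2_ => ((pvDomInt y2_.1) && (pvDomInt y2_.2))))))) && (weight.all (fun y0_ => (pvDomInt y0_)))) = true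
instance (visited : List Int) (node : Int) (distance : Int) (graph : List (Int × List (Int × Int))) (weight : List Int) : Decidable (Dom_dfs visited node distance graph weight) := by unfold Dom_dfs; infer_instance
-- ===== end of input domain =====

-- B replaces A's recursive backtracking DFS over a shared mutable visited set by a
-- level-synchronous (breadth-first) expansion of the path tree, each frontier entry
-- carrying its own immutable visited set (objective: alternative, not faster).
-- A mutates its `visited` argument transiently but always restores it before returning,
-- so the net side effect is nil; B performs no mutation. Equivalence is about the return value.

-- shared helper: `graph[node]` on the dict-as-association-list (first match; the
-- default [] is only reached on inputs Pre_dfs excludes, where Python raises KeyError)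
def pvNbrs (graph : List (Int × List (Int × Int))) (n : Int) : List (Int × Int) :=
  ((graph.find? (fun p => p.1 == n)).map Prod.snd).getD []

-- ===== PORT A =====
-- Fueled literal transliteration of A's recursion; fuel graph.length + 2 is a pure
-- totality guard (under Pre_dfs the recursion depth never reaches it, since every
-- entered node is a distinct graph key outside `visited`).  Each recursive Python call
-- restores `visited` before returning, so every sibling call sees the same set
-- `visited'`; the functional port passes `visited'` to each sibling accordingly.
-- weight[node - 1] is PySem.List.pyGet? (Python negative-index semantics); its
-- default 0 is only reached outside Pre_dfs (Python: IndexError).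
def dfsA (graph : List (Int × List (Int × Int))) (weight : List Int) :
    Nat → List Int → Int → Int → Int
  | 0, _, _, _ => 0
  | f + 1, visited, node, distance =>
    if PySem.Set.contains visited node then 0
    else
      let visited' := PySem.Set.add visited node
      let md := distance * ((PySem.List.pyGet? weight (node - 1)).getD 0)
      (pvNbrs graph node).foldl
        (fun acc p => acc + dfsA graph weight f visited' p.1 (distance + 1)) md

def dfs (visited : List Int) (node : Int) (distance : Int) (graph : List (Int × List (Int × Int))) (weight : List Int) : Int :=
  dfsA graph weight (graph.length + 2) visited node distance

-- ===== PORT B =====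
-- one frontier entry = (its own visited set, node, distance)
-- processing one frontier entry: skip if seen, else add its term and emit children
def pvStep (graph : List (Int × List (Int × Int))) (weight : List Int)
    (acc : Int × List (List Int × Int × Int)) (s : List Int × Int × Int) :
    Int × List (List Int × Int × Int) :=
  if PySem.Set.contains s.1 s.2.1 then acc
  else
    (acc.1 + s.2.2 * ((PySem.List.pyGet? weight (s.2.1 - 1)).getD 0),
     acc.2 ++ (pvNbrs graph s.2.1).map (fun p => (PySem.Set.add s.1 s.2.1, p.1, s.2.2 + 1)))

-- the `while frontier:` loop; same fuel bound (levels = path length ≤ graph.length + 1 under Pre_dfs)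
def pvLoop (graph : List (Int × List (Int × Int))) (weight : List Int) :
    Nat → Int → List (List Int × Int × Int) → Int
  | 0, total, _ => total
  | _ + 1, total, [] => total
  | f + 1, total, s :: fr =>
      let r := (s :: fr).foldl (pvStep graph weight) (total, [])
      pvLoop graph weight f r.1 r.2

def dfs_alt (visited : List Int) (node : Int) (distance : Int) (graph : List (Int × List (Int × Int))) (weight : List Int) : Int :=
  pvLoop graph weight (graph.length + 2) 0 [(visited, node, distance)]

-- ===== PRECONDITION & SPEC =====
-- pvReach: the nodes the traversal can reach from `node` avoiding `visited` — the
-- bounded transitive closure of the input graph's edge relation restricted to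
-- non-visited vertices (graph.length + 1 rounds reach the fixpoint, since expansion
-- only happens at graph keys).  This is a shape property of the input graph, not the
-- ports' path-summing recursion.
def pvReach (graph : List (Int × List (Int × Int))) (visited : List Int) (node : Int) : List Int :=
  (fun s => PySem.Set.update s (s.flatMap
      (fun n => ((pvNbrs graph n).map Prod.fst).filter (fun c => !(visited.contains c)))))^[graph.length + 1]
    (if visited.contains node then [] else [node])

-- Pre_dfs excludes exactly the inputs where Python A raises (IndexError: weight[n-1]
-- out of range, or KeyError: graph[n] missing, for some node n the traversal reaches),
-- plus duplicate-key association lists, which do not denote a Python dict.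
def Pre_dfs (visited : List Int) (node : Int) (distance : Int) (graph : List (Int × List (Int × Int))) (weight : List Int) : Prop :=
  (∀ n ∈ pvReach graph visited node,
      n ∈ graph.map Prod.fst ∧ PySem.Raise.InRange weight.length (n - 1)) ∧
  (graph.map Prod.fst).Nodup
instance (visited : List Int) (node : Int) (distance : Int) (graph : List (Int × List (Int × Int))) (weight : List Int) : Decidable (Pre_dfs visited node distance graph weight) := by unfold Pre_dfs; infer_instance

def pvWitness_dfs : List Int × Int × Int × (List (Int × List (Int × Int))) × List Int :=
  ([], 1, 2, [(1, [(2, 5)]), (2, [])], [7, 3])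

def Spec_dfs (visited : List Int) (node : Int) (distance : Int) (graph : List (Int × List (Int × Int))) (weight : List Int) (out : Int) : Prop := out = dfs_alt visited node distance graph weight
instance (visited : List Int) (node : Int) (distance : Int) (graph : List (Int × List (Int × Int))) (weight : List Int) (out : Int) : Decidable (Spec_dfs visited node distance graph weight out) := by unfold Spec_dfs; infer_instance

-- ===== CLAIM (what is proved, stated in full; the proofs are below) =====
def Claim_equal_dfs : Prop := ∀ (visited : List Int) (node : Int) (distance : Int) (graph : List (Int × List (Int × Int))) (weight : List Int), Dom_dfs visited node distance graph weight → Pre_dfs visited node distance graph weight → Spec_dfs visited node distance graph weight (dfs visited node distance graph weight)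

-- ===== LEMMAS AND PROOFS =====

-- the contribution of one frontier entry, and the children it emits
def pvHead (weight : List Int) (s : List Int × Int × Int) : Int :=
  if PySem.Set.contains s.1 s.2.1 then 0
  else s.2.2 * ((PySem.List.pyGet? weight (s.2.1 - 1)).getD 0)

def pvChildren (graph : List (Int × List (Int × Int))) (s : List Int × Int × Int) :
    List (List Int × Int × Int) :=
  if PySem.Set.contains s.1 s.2.1 then []
  else (pvNbrs graph s.2.1).map (fun p => (PySem.Set.add s.1 s.2.1, p.1, s.2.2 + 1))

theorem pvStep_foldl (graph : List (Int × List (Int × Int))) (weight : List Int)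
    (frontier : List (List Int × Int × Int)) :
    ∀ (total : Int) (acc : List (List Int × Int × Int)),
    frontier.foldl (pvStep graph weight) (total, acc) =
      (total + (frontier.map (pvHead weight)).sum,
       acc ++ frontier.flatMap (pvChildren graph)) := by
  induction frontier with
  | nil => intro total acc; simp
  | cons s fr ih =>
    intro total acc
    by_cases h : s.2.1 ∈ s.1
    · simp [pvStep, pvHead, pvChildren, h, ih]
    · simp [pvStep, pvHead, pvChildren, h, ih, add_assoc]

theorem dfsA_succ (graph : List (Int × List (Int × Int))) (weight : List Int)
    (f : Nat) (s : List Int × Int × Int) :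
    dfsA graph weight (f + 1) s.1 s.2.1 s.2.2 =
      pvHead weight s +
        ((pvChildren graph s).map (fun c => dfsA graph weight f c.1 c.2.1 c.2.2)).sum := by
  by_cases h : s.2.1 ∈ s.1
  · simp [dfsA, pvHead, pvChildren, h]
  · simp [dfsA, pvHead, pvChildren, h, PySem.List.foldl_add, Function.comp_def]

theorem pvLoop_eq (graph : List (Int × List (Int × Int))) (weight : List Int) :
    ∀ (f : Nat) (total : Int) (frontier : List (List Int × Int × Int)),
    pvLoop graph weight f total frontier =
      total + (frontier.map (fun s => dfsA graph weight f s.1 s.2.1 s.2.2)).sum := by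
  intro f
  induction f with
  | zero => intro total frontier; simp [pvLoop, dfsA]
  | succ f ih =>
    intro total frontier
    cases frontier with
    | nil => simp [pvLoop]
    | cons s fr =>
      show pvLoop graph weight (f + 1) total (s :: fr) = _
      rw [pvLoop]
      rw [pvStep_foldl]
      rw [ih]
      simp only [List.nil_append]
      have hsum : ∀ (l : List (List Int × Int × Int)),
          (l.map (fun s => dfsA graph weight (f + 1) s.1 s.2.1 s.2.2)).sum =
            (l.map (pvHead weight)).sum +
              ((l.flatMap (pvChildren graph)).map
                (fun c => dfsA graph weight f c.1 c.2.1 c.2.2)).sum := by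
        intro l
        induction l with
        | nil => simp
        | cons x xs ihx =>
          simp only [List.map_cons, List.sum_cons, List.flatMap_cons, List.map_append,
            List.sum_append, ihx, dfsA_succ graph weight f x]
          ring
      rw [hsum (s :: fr)]
      ring

-- ===== VERDICT (by name: the statement is the Claim_ definition above) =====
theorem dfs_spec : Claim_equal_dfs := by
  intro visited node distance graph weight _ _
  unfold Spec_dfs dfs dfs_alt
  rw [pvLoop_eq]
  simp
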